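-- pv_equiv track=rewrite | github.com/odarroyo/RCIF-2D | app_2d_building_analysis_infills.py | get_valid_panels
-- ===== SOURCE A (Python) =====
-- def get_valid_panels(coordx, coordy, model_node_tags):
--     """
--     Determine which panels are valid for infill placement.
--     A panel is valid if all 4 corner nodes exist in the model after hanging node removal.
--
--     Returns a dict: {floor: {span: True/False}}
--     """
--     n_floors = len(coordy) - 1
--     n_spans = len(coordx) - 1
--     valid = {}
--     node_set = set(model_node_tags)
--
--     for f in range(1, n_floors + 1):
--         valid[f] = {}
--         for s in range(n_spans):
--             # Node numbering: 1000*(x_idx+1) + y_idx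
--             # Bottom-left: x_idx=s, y_idx=f-1
--             # Bottom-right: x_idx=s+1, y_idx=f-1
--             # Top-left: x_idx=s, y_idx=f
--             # Top-right: x_idx=s+1, y_idx=f
--             n_bl = 1000 * (s + 1) + (f - 1)
--             n_br = 1000 * (s + 2) + (f - 1)
--             n_tl = 1000 * (s + 1) + f
--             n_tr = 1000 * (s + 2) + f
--             valid[f][s] = all(n in node_set for n in [n_bl, n_br, n_tl, n_tr])
--
--     return valid
-- ===== SOURCE B (Python) =====
-- def get_valid_panels(coordx, coordy, model_node_tags):
--     """
--     Determine which panels are valid for infill placement.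
--     A panel is valid if all 4 corner nodes exist in the model after hanging node removal.
--
--     Returns a dict: {floor: {span: True/False}}
--     """
--     n_floors = len(coordy) - 1
--     n_spans = len(coordx) - 1
--     node_set = set(model_node_tags)
--
--     # For each y-level, the set of column positions x whose node 1000*x + y exists.
--     present = [{x for x in range(1, n_spans + 2) if 1000 * x + y in node_set}
--                for y in range(n_floors + 1)]
--
--     valid = {}
--     for f in range(1, n_floors + 1):
--         # Columns running the full height of floor f (node at both bounding levels).
--         col_ok = present[f - 1] & present[f]
--         valid[f] = {s: (s + 1 in col_ok) and (s + 2 in col_ok) for s in range(n_spans)}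
--     return valid
-- ===== Notes on version B (the rewrite author's own statement) =====
-- stated objective: alternative
-- what changed: B precomputes, per y-level, the set of column positions whose node exists, intersects adjacent levels once per floor, and derives each panel's validity from two set-membership tests instead of four independent node lookups per panel.
import Mathlib
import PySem

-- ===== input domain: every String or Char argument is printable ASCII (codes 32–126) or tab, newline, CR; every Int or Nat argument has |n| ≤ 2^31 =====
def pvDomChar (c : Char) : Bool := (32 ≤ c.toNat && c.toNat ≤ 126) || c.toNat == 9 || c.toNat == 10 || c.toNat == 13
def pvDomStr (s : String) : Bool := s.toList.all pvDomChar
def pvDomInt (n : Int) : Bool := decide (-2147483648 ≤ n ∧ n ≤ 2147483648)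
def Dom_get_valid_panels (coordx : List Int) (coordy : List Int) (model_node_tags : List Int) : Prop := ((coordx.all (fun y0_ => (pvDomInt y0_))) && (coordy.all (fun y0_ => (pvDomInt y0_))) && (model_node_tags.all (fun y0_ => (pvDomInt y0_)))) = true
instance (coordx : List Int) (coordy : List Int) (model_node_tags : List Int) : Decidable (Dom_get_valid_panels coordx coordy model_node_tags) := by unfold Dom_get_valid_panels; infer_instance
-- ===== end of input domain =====

-- B derives each panel's validity from per-level column-presence sets intersected per floor,
-- instead of four independent node-set lookups per panel (alternative decomposition, same cost).


-- ===== PORT A =====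
def get_valid_panels (coordx : List Int) (coordy : List Int) (model_node_tags : List Int) : List (Int × List (Int × Bool)) :=
  let n_floors : Int := (coordy.length : Int) - 1
  let n_spans : Int := (coordx.length : Int) - 1
  let node_set : PySem.Set Int := PySem.Set.ofList model_node_tags
  (PySem.List.pyRange 1 (n_floors + 1) 1).foldl (fun valid f =>
    let row := (PySem.List.pyRange 0 n_spans 1).foldl (fun r s =>
      let n_bl := 1000 * (s + 1) + (f - 1)
      let n_br := 1000 * (s + 2) + (f - 1)
      let n_tl := 1000 * (s + 1) + f
      let n_tr := 1000 * (s + 2) + f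
      r ++ [(s, [n_bl, n_br, n_tl, n_tr].all (fun n => PySem.Set.contains node_set n))]) []
    valid ++ [(f, row)]) []

-- ===== PORT B =====
def get_valid_panels_alt (coordx : List Int) (coordy : List Int) (model_node_tags : List Int) : List (Int × List (Int × Bool)) :=
  let n_floors : Int := (coordy.length : Int) - 1
  let n_spans : Int := (coordx.length : Int) - 1
  let node_set : PySem.Set Int := PySem.Set.ofList model_node_tags
  let present : List (PySem.Set Int) :=
    (PySem.List.pyRange 0 (n_floors + 1) 1).map (fun y =>
      PySem.Set.ofList ((PySem.List.pyRange 1 (n_spans + 2) 1).filter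
        (fun x => PySem.Set.contains node_set (1000 * x + y))))
  (PySem.List.pyRange 1 (n_floors + 1) 1).map (fun f =>
    let col_ok := PySem.Set.inter (PySem.List.pyGetD present (f - 1) PySem.Set.empty)
                                  (PySem.List.pyGetD present f PySem.Set.empty)
    (f, (PySem.List.pyRange 0 n_spans 1).map (fun s =>
      (s, PySem.Set.contains col_ok (s + 1) && PySem.Set.contains col_ok (s + 2)))))

-- ===== PRECONDITION & SPEC =====
def Spec_get_valid_panels (coordx : List Int) (coordy : List Int) (model_node_tags : List Int) (out : List (Int × List (Int × Bool))) : Prop := out = get_valid_panels_alt coordx coordy model_node_tags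
instance (coordx : List Int) (coordy : List Int) (model_node_tags : List Int) (out : List (Int × List (Int × Bool))) : Decidable (Spec_get_valid_panels coordx coordy model_node_tags out) := by unfold Spec_get_valid_panels; infer_instance

-- ===== CLAIM (what is proved, stated in full; the proofs are below) =====
def Claim_equal_get_valid_panels : Prop := ∀ (coordx : List Int) (coordy : List Int) (model_node_tags : List Int), Dom_get_valid_panels coordx coordy model_node_tags → Spec_get_valid_panels coordx coordy model_node_tags (get_valid_panels coordx coordy model_node_tags)

-- ===== LEMMAS AND PROOFS =====

-- Membership in a per-level presence set of B.
lemma mem_presentSet (ns : PySem.Set Int) (n_spans y v : Int) :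
    v ∈ PySem.Set.ofList ((PySem.List.pyRange 1 (n_spans + 2) 1).filter
        (fun x => PySem.Set.contains ns (1000 * x + y))) ↔
      (1 ≤ v ∧ v < n_spans + 2) ∧ PySem.Set.contains ns (1000 * v + y) = true := by
  simp [PySem.Set.mem_ofList, List.mem_filter, PySem.List.mem_pyRange_one]

-- The per-panel boolean of A equals B's two intersection-membership tests,
-- for f and s inside the loop ranges.
lemma panel_bool_eq (ns : PySem.Set Int) (n_floors n_spans f s : Int)
    (hf : 1 ≤ f ∧ f < n_floors + 1) (hs : 0 ≤ s ∧ s < n_spans) :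
    ([1000 * (s + 1) + (f - 1), 1000 * (s + 2) + (f - 1),
      1000 * (s + 1) + f, 1000 * (s + 2) + f].all (fun n => PySem.Set.contains ns n)) =
    (PySem.Set.contains (PySem.Set.inter
        (PySem.List.pyGetD ((PySem.List.pyRange 0 (n_floors + 1) 1).map (fun y =>
          PySem.Set.ofList ((PySem.List.pyRange 1 (n_spans + 2) 1).filter
            (fun x => PySem.Set.contains ns (1000 * x + y))))) (f - 1) PySem.Set.empty)
        (PySem.List.pyGetD ((PySem.List.pyRange 0 (n_floors + 1) 1).map (fun y =>
          PySem.Set.ofList ((PySem.List.pyRange 1 (n_spans + 2) 1).filter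
            (fun x => PySem.Set.contains ns (1000 * x + y))))) f PySem.Set.empty)) (s + 1) &&
     PySem.Set.contains (PySem.Set.inter
        (PySem.List.pyGetD ((PySem.List.pyRange 0 (n_floors + 1) 1).map (fun y =>
          PySem.Set.ofList ((PySem.List.pyRange 1 (n_spans + 2) 1).filter
            (fun x => PySem.Set.contains ns (1000 * x + y))))) (f - 1) PySem.Set.empty)
        (PySem.List.pyGetD ((PySem.List.pyRange 0 (n_floors + 1) 1).map (fun y =>
          PySem.Set.ofList ((PySem.List.pyRange 1 (n_spans + 2) 1).filter
            (fun x => PySem.Set.contains ns (1000 * x + y))))) f PySem.Set.empty)) (s + 2)) := by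
  rw [PySem.List.pyGetD_map_pyRange_of_nonneg _ _ _ _ (by omega) (by omega),
      PySem.List.pyGetD_map_pyRange_of_nonneg _ _ _ _ (by omega) (by omega)]
  rw [Bool.eq_iff_iff]
  simp only [List.all_cons, List.all_nil, Bool.and_eq_true, PySem.Set.contains_iff,
    PySem.Set.mem_inter, mem_presentSet]
  have hb1 : 1 ≤ s + 1 ∧ s + 1 < n_spans + 2 := by omega
  have hb2 : 1 ≤ s + 2 ∧ s + 2 < n_spans + 2 := by omega
  tauto

-- ===== VERDICT (by name: the statement is the Claim_ definition above) =====
theorem get_valid_panels_spec : Claim_equal_get_valid_panels := by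
  intro coordx coordy model_node_tags _
  unfold Spec_get_valid_panels get_valid_panels get_valid_panels_alt
  simp only []
  rw [PySem.List.foldl_append_singleton_eq_map]
  simp only [List.nil_append]
  apply List.map_congr_left
  intro f hf
  rw [PySem.List.foldl_append_singleton_eq_map]
  simp only [List.nil_append]
  congr 1
  apply List.map_congr_left
  intro s hs
  rw [PySem.List.mem_pyRange_one] at hf hs
  congr 1
  exact panel_bool_eq _ _ _ _ _ hf hs
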